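-- pv_equiv track=rewrite | github.com/Ne0r0/PTUA17-functions | ex1.py | puzzle_pieces
-- ===== SOURCE A (Python) =====
-- from typing import List
--
-- def puzzle_pieces(first_list: List[int], second_list: List[int]) -> bool:
--     if len(first_list) != len(second_list): #checking if list are same length
--         return False
--
--     sums: List[int] = [] #creating empty list
--     for i in range(len(first_list)): #Loop through all elements in the lists
--         sums.append(first_list[i] + second_list[i])
--
--     if len(set(sums)) == 1: #Check if all sum lists are the same
--         return True
--     else:
--         return False
-- ===== SOURCE B (Python) =====
-- def puzzle_pieces(first_list, second_list):
--     if len(first_list) != len(second_list):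
--         return False
--     if not first_list:
--         return False
--     target = first_list[0] + second_list[0]
--     for x, y in zip(first_list, second_list):
--         if x + y != target:
--             return False
--     return True
-- ===== Notes on version B (the rewrite author's own statement) =====
-- stated objective: simpler
-- what changed: Instead of materialising a list of all pairwise sums and deduplicating it through a set, B compares each pair-sum against the first pair's sum in one pass with early exit, keeping only a scalar.
import Mathlib
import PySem

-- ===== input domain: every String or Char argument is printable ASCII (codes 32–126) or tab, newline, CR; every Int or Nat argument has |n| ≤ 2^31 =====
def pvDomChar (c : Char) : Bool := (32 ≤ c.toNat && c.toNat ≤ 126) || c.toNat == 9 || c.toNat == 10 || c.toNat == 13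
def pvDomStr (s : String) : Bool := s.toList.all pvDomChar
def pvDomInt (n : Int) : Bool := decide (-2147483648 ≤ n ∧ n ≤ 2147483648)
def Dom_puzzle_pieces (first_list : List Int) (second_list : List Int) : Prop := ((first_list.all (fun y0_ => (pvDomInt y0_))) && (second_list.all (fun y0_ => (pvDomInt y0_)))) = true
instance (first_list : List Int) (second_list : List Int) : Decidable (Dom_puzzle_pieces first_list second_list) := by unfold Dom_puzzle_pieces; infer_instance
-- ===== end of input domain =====

-- B replaces A's "materialise all pairwise sums, deduplicate via a set, test set size 1"
-- with a single early-exit pass comparing each pair-sum to the first pair's sum (simpler, O(1) extra space).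


-- ===== PORT A =====
def puzzle_pieces (first_list : List Int) (second_list : List Int) : Bool :=
  if first_list.length ≠ second_list.length then false
  else
    -- sums = []; for i in range(len(first_list)): sums.append(first_list[i] + second_list[i])
    let sums : List Int :=
      (PySem.List.pyRange 0 (first_list.length : Int) 1).foldl
        (fun acc i => acc ++ [PySem.List.pyGetD first_list i 0 + PySem.List.pyGetD second_list i 0]) []
    if (PySem.Set.ofList sums).length = 1 then true else false

-- ===== PORT B =====
def puzzle_pieces_alt (first_list : List Int) (second_list : List Int) : Bool :=
  if first_list.length ≠ second_list.length then false
  else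
    match first_list, second_list with
    | [], _ => false
    | _, [] => false
    | a :: _, b :: _ =>
      (first_list.zip second_list).all (fun p => p.1 + p.2 == a + b)

-- ===== PRECONDITION & SPEC =====
def Spec_puzzle_pieces (first_list : List Int) (second_list : List Int) (out : Bool) : Prop := out = puzzle_pieces_alt first_list second_list
instance (first_list : List Int) (second_list : List Int) (out : Bool) : Decidable (Spec_puzzle_pieces first_list second_list out) := by unfold Spec_puzzle_pieces; infer_instance

-- ===== CLAIM (what is proved, stated in full; the proofs are below) =====
def Claim_equal_puzzle_pieces : Prop := ∀ (first_list : List Int) (second_list : List Int), Dom_puzzle_pieces first_list second_list → Spec_puzzle_pieces first_list second_list (puzzle_pieces first_list second_list)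

-- ===== LEMMAS AND PROOFS =====

-- A's index loop builds exactly the list of pairwise sums.
lemma sums_eq_zipWith (f s : List Int) (h : f.length = s.length) :
    (PySem.List.pyRange 0 (f.length : Int) 1).foldl
      (fun acc i => acc ++ [PySem.List.pyGetD f i 0 + PySem.List.pyGetD s i 0]) []
      = List.zipWith (· + ·) f s := by
  rw [PySem.List.foldl_append_singleton_eq_map, List.nil_append]
  apply List.ext_getElem
  · simp [PySem.List.length_pyRange_one, List.length_zipWith, h]
  · intro i h1 h2
    have hi1 : i < f.length := by
      simpa [PySem.List.length_pyRange_one] using h1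
    have hi2 : i < s.length := h ▸ hi1
    simp only [List.getElem_map, PySem.List.getElem_pyRange_one, List.getElem_zipWith]
    rw [zero_add, PySem.List.pyGetD_natCast, PySem.List.pyGetD_natCast]
    simp [hi1, hi2]

-- len(set(l)) == 1 for a nonempty l says every element equals the head.
lemma ofList_len_one (c : Int) (t : List Int) :
    (PySem.Set.ofList (c :: t)).length = 1 ↔ ∀ y ∈ t, y = c := by
  constructor
  · intro h1 y hy
    have hyo : y ∈ PySem.Set.ofList (c :: t) := by
      rw [PySem.Set.mem_ofList]; exact List.mem_cons_of_mem _ hy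
    have hco : c ∈ PySem.Set.ofList (c :: t) := by
      rw [PySem.Set.mem_ofList]; exact List.mem_cons_self
    match hl : PySem.Set.ofList (c :: t) with
    | [x] =>
      rw [hl] at hyo hco
      simp at hyo hco; omega
    | [] => rw [hl] at h1; simp at h1
    | x :: y :: r => rw [hl] at h1; simp at h1
  · intro hall
    have hmemiff : ∀ y, y ∈ PySem.Set.ofList (c :: t) ↔ y = c := by
      intro y
      rw [PySem.Set.mem_ofList]
      constructor
      · intro hy
        rcases List.mem_cons.mp hy with h | h
        · exact h
        · exact hall y h
      · intro hy; rw [hy]; exact List.mem_cons_self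
    have hnd : (PySem.Set.ofList (c :: t)).Nodup := PySem.Set.nodup_ofList _
    match hl : PySem.Set.ofList (c :: t) with
    | [x] => rfl
    | [] =>
      exfalso
      have := (hmemiff c).mpr rfl
      rw [hl] at this; simp at this
    | x :: y :: r =>
      exfalso
      rw [hl] at hmemiff hnd
      have hx : x = c := (hmemiff x).mp (by simp)
      have hy : y = c := (hmemiff y).mp (by simp)
      simp [hx, hy] at hnd

-- ===== VERDICT (by name: the statement is the Claim_ definition above) =====
theorem puzzle_pieces_spec : Claim_equal_puzzle_pieces := by
  intro f s _
  unfold Spec_puzzle_pieces puzzle_pieces puzzle_pieces_alt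
  by_cases hlen : f.length = s.length
  · rw [if_neg (not_not_intro hlen), if_neg (not_not_intro hlen)]
    match f, s with
    | [], [] => decide
    | [], b :: s' => simp at hlen
    | a :: f', [] => simp at hlen
    | a :: f', b :: s' =>
      dsimp only
      rw [sums_eq_zipWith _ _ hlen]
      simp only [List.zipWith_cons_cons, List.zip_cons_cons, List.all_cons,
        beq_self_eq_true, Bool.true_and]
      have hiff := ofList_len_one (a + b) (List.zipWith (· + ·) f' s')
      have hzip : List.zipWith (· + ·) f' s' = (f'.zip s').map (fun p => p.1 + p.2) := by
        rw [List.zip_eq_zipWith, List.map_zipWith]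
      have hall : ((f'.zip s').all (fun p => p.1 + p.2 == a + b) = true)
          ↔ ∀ y ∈ List.zipWith (· + ·) f' s', y = a + b := by
        rw [hzip]
        simp only [List.all_eq_true, beq_iff_eq, List.mem_map, forall_exists_index, and_imp,
          Prod.forall]
        constructor
        · rintro h y x z hm rfl
          exact h x z hm
        · intro h x z hm
          exact h _ x z hm rfl
      split_ifs with hset
      · exact (hall.mpr (hiff.mp hset)).symm
      · exact (Bool.eq_false_iff.mpr (fun h => hset (hiff.mpr (hall.mp h)))).symm
  · simp [hlen]
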